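-- pv_equiv track=rewrite | github.com/cherry01027/DPGASP | model.py | symbol_extraction
-- ===== SOURCE A (Python) =====
-- symbol_list = ['~', '!', '@', '#', '$', '%', '^', '&', '*', '(', ')', '_', '+', '-', '=', '{', '}', '[', ']', '|', '\\', ';', ':', '"', "'", '<', '>', ',', '.', '/', '?']
--
-- def symbol_extraction(string, symbol_dict):
--     symbol_contains = False
--     for i in symbol_list:
--         if i in string:
--             symbol_contains = True
--             break
--     if symbol_contains:
--         symbol_dict.setdefault(1, 0)
--         symbol_dict[1] += 1
--     else:
--         symbol_dict.setdefault(0, 0)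
--         symbol_dict[0] += 1
--     return symbol_dict
-- ===== SOURCE B (Python) =====
-- symbol_list = ['~', '!', '@', '#', '$', '%', '^', '&', '*', '(', ')', '_', '+', '-', '=', '{', '}', '[', ']', '|', '\\', ';', ':', '"', "'", '<', '>', ',', '.', '/', '?']
--
-- _SYMBOL_CHARS = frozenset(symbol_list)
--
-- def symbol_extraction(string, symbol_dict):
--     key = 1 if any(ch in _SYMBOL_CHARS for ch in string) else 0
--     symbol_dict[key] = symbol_dict.setdefault(key, 0) + 1
--     return symbol_dict
-- ===== Notes on version B (the rewrite author's own statement) =====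
-- stated objective: idiomatic
-- what changed: B scans the characters of the input string once against a precomputed frozenset of symbol characters (any(...)), instead of A's loop over the 31 symbols each doing a substring search; the two count branches are merged into one setdefault/assignment on a computed key.
import Mathlib
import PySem

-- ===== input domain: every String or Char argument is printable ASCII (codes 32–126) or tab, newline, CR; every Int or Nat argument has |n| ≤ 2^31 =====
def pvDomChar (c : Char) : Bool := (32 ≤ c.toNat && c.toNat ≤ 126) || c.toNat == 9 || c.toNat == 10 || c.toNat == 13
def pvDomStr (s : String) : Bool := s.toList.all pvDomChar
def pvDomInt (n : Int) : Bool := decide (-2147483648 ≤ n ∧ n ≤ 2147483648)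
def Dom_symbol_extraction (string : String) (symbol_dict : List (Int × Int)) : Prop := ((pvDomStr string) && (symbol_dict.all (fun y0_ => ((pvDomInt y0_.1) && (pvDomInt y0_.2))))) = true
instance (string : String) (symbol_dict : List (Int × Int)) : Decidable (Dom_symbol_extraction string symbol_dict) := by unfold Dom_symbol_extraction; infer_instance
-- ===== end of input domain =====

-- One line: B replaces A's 31 substring searches by one pass over the string's characters against a
-- precomputed symbol-character set and merges the two count branches into one keyed update (idiomatic).
-- Both Pythons mutate symbol_dict in place and return it; the equivalence here is about the returned value.

-- ===== PORT A =====
def symListA : List String :=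
  ["~", "!", "@", "#", "$", "%", "^", "&", "*", "(", ")", "_", "+", "-", "=",
   "{", "}", "[", "]", "|", "\\", ";", ":", "\"", "'", "<", ">", ",", ".", "/", "?"]

-- the 'for i in symbol_list: if i in string: …; break' loop
def loopA (string : String) : List String → Bool
  | [] => false
  | i :: rest => if PySem.Str.isIn i string then true else loopA string rest

def symbol_extraction (string : String) (symbol_dict : List (Int × Int)) : List (Int × Int) :=
  let dd := PySem.Dict.mk symbol_dict
  let symbol_contains := loopA string symListA
  if symbol_contains then
    (((dd.setdefault 1 0)).modify 1 0 (· + 1)).items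
  else
    (((dd.setdefault 0 0)).modify 0 0 (· + 1)).items

-- ===== PORT B =====
def symCharsB : List Char :=
  ['~', '!', '@', '#', '$', '%', '^', '&', '*', '(', ')', '_', '+', '-', '=',
   '{', '}', '[', ']', '|', '\\', ';', ':', '"', '\'', '<', '>', ',', '.', '/', '?']

def symbol_extraction_alt (string : String) (symbol_dict : List (Int × Int)) : List (Int × Int) :=
  let key : Int := if string.toList.any (fun ch => symCharsB.contains ch) then 1 else 0
  let dd := PySem.Dict.mk symbol_dict
  let v := (dd.setdefault key 0).getD key 0   -- value returned by setdefault(key, 0)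
  ((dd.setdefault key 0).insert key (v + 1)).items

-- ===== PRECONDITION & SPEC =====
def Spec_symbol_extraction (string : String) (symbol_dict : List (Int × Int)) (out : List (Int × Int)) : Prop := out = symbol_extraction_alt string symbol_dict
instance (string : String) (symbol_dict : List (Int × Int)) (out : List (Int × Int)) : Decidable (Spec_symbol_extraction string symbol_dict out) := by unfold Spec_symbol_extraction; infer_instance

-- ===== CLAIM (what is proved, stated in full; the proofs are below) =====
def Claim_equal_symbol_extraction : Prop := ∀ (string : String) (symbol_dict : List (Int × Int)), Dom_symbol_extraction string symbol_dict → Spec_symbol_extraction string symbol_dict (symbol_extraction string symbol_dict)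

-- ===== LEMMAS AND PROOFS =====

-- A's early-exit loop is List.any of the substring test
theorem loopA_eq_any (s : String) (l : List String) :
    loopA s l = l.any (fun i => PySem.Str.isIn i s) := by
  induction l with
  | nil => rfl
  | cons i rest ih => cases hi : PySem.Str.isIn i s <;> simp [loopA, hi, ih]

-- the symbol list is exactly the symbol characters as one-char strings
theorem symListA_eq_map : symListA = symCharsB.map (fun c => String.ofList [c]) := by decide

-- substring test with a one-character needle is character membership
theorem isIn_single (c : Char) (s : String) :
    PySem.Str.isIn (String.ofList [c]) s = s.toList.contains c := by
  rw [Bool.eq_iff_iff]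
  simp [PySem.Chars.isIn_iff_infix, List.singleton_infix_iff]

-- A's flag equals B's flag
theorem flag_eq (s : String) :
    loopA s symListA = s.toList.any (fun ch => symCharsB.contains ch) := by
  rw [loopA_eq_any, symListA_eq_map]
  simp only [List.any_map, Function.comp_def, isIn_single]
  rw [Bool.eq_iff_iff]
  simp only [List.any_eq_true, List.contains_eq_mem, decide_eq_true_eq]
  tauto

-- modify-by-one after setdefault IS insert of getD+1 after setdefault
theorem modify_eq_insert (d : PySem.Dict Int Int) (k : Int) :
    (d.setdefault k 0).modify k 0 (· + 1)
      = (d.setdefault k 0).insert k ((d.setdefault k 0).getD k 0 + 1) :=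
  (PySem.Dict.ext_iff.mpr rfl).symm

-- ===== VERDICT (by name: the statement is the Claim_ definition above) =====
theorem symbol_extraction_spec : Claim_equal_symbol_extraction := by
  intro s d _
  unfold Spec_symbol_extraction symbol_extraction symbol_extraction_alt
  rw [flag_eq]
  cases h : s.toList.any (fun ch => symCharsB.contains ch) <;>
    simp only [h, Bool.false_eq_true, if_false, if_true, modify_eq_insert]
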